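-- pv_equiv track=rewrite | github.com/Lucaslgl0/Projet-Cryptologie-S2 | operations.py | EstPlusGrand
-- ===== SOURCE A (Python) =====
-- def EstPlusGrand(L1, L2):
--     if len(L1) < len(L2):
--         L1 = [0 for i in range(len(L2) - len(L1))] + L1
--     else:
--         L2 = [0 for i in range(len(L1) - len(L2))] + L2
--     for i in range(len(L1)):
--         if L1[i] == L2[i]:
--             continue
--         elif L1[i] < L2[i]:
--             return False
--         else:
--             return True
--     return False
-- ===== SOURCE B (Python) =====
-- def EstPlusGrand(L1, L2):
--     # Right-to-left accumulating scan: the most-significant difference (visited last) decides.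
--     if len(L1) < len(L2):
--         L1 = [0] * (len(L2) - len(L1)) + L1
--     else:
--         L2 = [0] * (len(L1) - len(L2)) + L2
--     res = False
--     for i in range(len(L1) - 1, -1, -1):
--         if L1[i] != L2[i]:
--             res = L1[i] > L2[i]
--     return res
-- ===== Notes on version B (the rewrite author's own statement) =====
-- stated objective: alternative
-- what changed: Replaces A's early-returning most-significant-first scan with a right-to-left (least-significant-first) accumulating pass with no early return: the result is overwritten at each differing position, so the last update (most significant difference) decides.
import Mathlib
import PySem

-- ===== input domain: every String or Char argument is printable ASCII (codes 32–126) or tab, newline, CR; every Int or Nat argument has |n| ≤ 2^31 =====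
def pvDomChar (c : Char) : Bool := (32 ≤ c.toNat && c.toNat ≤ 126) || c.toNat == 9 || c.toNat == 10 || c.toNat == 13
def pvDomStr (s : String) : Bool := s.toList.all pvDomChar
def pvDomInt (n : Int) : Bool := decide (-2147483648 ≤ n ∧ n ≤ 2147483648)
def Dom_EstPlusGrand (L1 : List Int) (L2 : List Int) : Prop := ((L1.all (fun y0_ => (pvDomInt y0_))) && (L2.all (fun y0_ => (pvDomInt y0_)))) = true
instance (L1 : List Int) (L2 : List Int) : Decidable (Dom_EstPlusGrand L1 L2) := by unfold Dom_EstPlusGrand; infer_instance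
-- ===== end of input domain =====

-- B replaces A's early-returning most-significant-first scan by a right-to-left accumulating pass (alternative decomposition, same cost).


-- ===== PORT A =====
-- A's index loop over the two equal-length padded lists, with early returns:
-- walk the aligned pairs left to right, deciding at the first differing pair.
def pvScanA : List (Int × Int) → Bool
  | [] => false
  | (x, y) :: t => if x = y then pvScanA t else if x < y then false else true

def EstPlusGrand (L1 : List Int) (L2 : List Int) : Bool :=
  let P1 := if L1.length < L2.length then List.replicate (L2.length - L1.length) 0 ++ L1 else L1
  let P2 := if L1.length < L2.length then L2 else List.replicate (L1.length - L2.length) 0 ++ L2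
  pvScanA (P1.zip P2)

-- ===== PORT B =====
-- B's loop runs i from the last index down to 0, updating an accumulator:
-- a left fold over the REVERSED aligned pairs.
def EstPlusGrand_alt (L1 : List Int) (L2 : List Int) : Bool :=
  let P1 := if L1.length < L2.length then List.replicate (L2.length - L1.length) 0 ++ L1 else L1
  let P2 := if L1.length < L2.length then L2 else List.replicate (L1.length - L2.length) 0 ++ L2
  (P1.zip P2).reverse.foldl (fun res (x, y) => if x ≠ y then decide (x > y) else res) false

-- ===== PRECONDITION & SPEC =====
def Spec_EstPlusGrand (L1 : List Int) (L2 : List Int) (out : Bool) : Prop := out = EstPlusGrand_alt L1 L2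
instance (L1 : List Int) (L2 : List Int) (out : Bool) : Decidable (Spec_EstPlusGrand L1 L2 out) := by unfold Spec_EstPlusGrand; infer_instance

-- ===== CLAIM (what is proved, stated in full; the proofs are below) =====
def Claim_equal_EstPlusGrand : Prop := ∀ (L1 : List Int) (L2 : List Int), Dom_EstPlusGrand L1 L2 → Spec_EstPlusGrand L1 L2 (EstPlusGrand L1 L2)

-- ===== LEMMAS AND PROOFS =====
theorem scanA_eq_foldl_reverse (ps : List (Int × Int)) :
    pvScanA ps = ps.reverse.foldl (fun res (x, y) => if x ≠ y then decide (x > y) else res) false := by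
  induction ps with
  | nil => rfl
  | cons p t ih =>
    obtain ⟨x, y⟩ := p
    simp only [List.reverse_cons, List.foldl_append, List.foldl_cons, List.foldl_nil, ← ih,
      pvScanA]
    by_cases h : x = y
    · simp [h]
    · simp only [if_neg h, ne_eq, h, not_false_eq_true, if_pos]
      rcases lt_trichotomy x y with hlt | heq | hgt
      · simp [if_pos hlt, not_lt.mpr (le_of_lt hlt)]
      · exact absurd heq h
      · simp [if_neg (not_lt.mpr (le_of_lt hgt)), hgt]

-- ===== VERDICT (by name: the statement is the Claim_ definition above) =====
theorem EstPlusGrand_spec : Claim_equal_EstPlusGrand := by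
  intro L1 L2 _
  unfold Spec_EstPlusGrand EstPlusGrand EstPlusGrand_alt
  exact scanA_eq_foldl_reverse _
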